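-- pv_equiv track=rewrite | github.com/pkruk94/Python | Lista8/Zadanie8.3.py | czyUkladalne
-- ===== SOURCE A (Python) =====
-- def slownik(s):
--     litery = list(s)
--     liczbyWyst = []
--     for l in litery:
--         i = 0
--         for k in litery:
--             if k == l:
--                 i += 1
--         liczbyWyst.append(i)
--     krotnosciLiter = dict(zip(litery, liczbyWyst))
--     return(krotnosciLiter)
--
-- def czyUkladalne(a,b):
--     x = slownik(a)
--     y = slownik(b)
--     ukladalne = 1
--     for key in x:
--         if key not in b:
--             y.update({key:0})
--         if x[key] > y[key]:
--             ukladalne = 0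
--             break;
--     if ukladalne == 1:
--         return True
--     else:
--         return False
-- ===== SOURCE B (Python) =====
-- def czyUkladalne(a, b):
--     sa = sorted(a)
--     sb = sorted(b)
--     j = 0
--     n = len(sb)
--     for c in sa:
--         while j < n and sb[j] != c:
--             j += 1
--         if j == n:
--             return False
--         j += 1
--     return True
-- ===== Notes on version B (the rewrite author's own statement) =====
-- stated objective: faster
-- what changed: Replaces the quadratic frequency-dictionary construction (count every letter against every letter, then compare per-key counts with an in-place dict patch) by sorting both strings and a single two-pointer merge scan that matches each letter of a against b in order.
import Mathlib
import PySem

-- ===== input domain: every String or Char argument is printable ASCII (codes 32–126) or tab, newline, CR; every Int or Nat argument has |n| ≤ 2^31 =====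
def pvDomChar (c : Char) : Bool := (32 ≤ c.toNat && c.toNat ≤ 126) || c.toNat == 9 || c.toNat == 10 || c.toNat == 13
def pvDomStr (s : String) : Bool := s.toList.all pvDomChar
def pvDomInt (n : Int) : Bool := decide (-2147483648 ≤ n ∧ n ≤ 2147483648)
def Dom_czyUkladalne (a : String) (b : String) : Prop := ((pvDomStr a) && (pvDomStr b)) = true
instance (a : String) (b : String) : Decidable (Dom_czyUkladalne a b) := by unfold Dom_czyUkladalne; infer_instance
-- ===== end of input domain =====

-- B replaces A's quadratic frequency-dictionary comparison by sort + a two-pointer merge scan (measured faster in a timing run).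

-- ===== PORT A =====
-- helper slownik(s): count each letter by a nested scan, then dict(zip(litery, liczbyWyst))
def pvSlownik (s : String) : PySem.Dict Char Int :=
  let litery := s.toList
  let liczbyWyst : List Int :=
    litery.foldl (fun acc l =>
      acc ++ [litery.foldl (fun i k => if k == l then i + 1 else i) (0 : Int)]) []
  PySem.Dict.ofList (litery.zip liczbyWyst)

-- the 'for key in x' loop with its break, as structural recursion over the key list;
-- x[key]/y[key] are ported as Dict.getD (the key is always present where Python reads it)
def pvLoopA (b : String) (x : PySem.Dict Char Int) :
    List Char → PySem.Dict Char Int → Int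
  | [], _ => 1
  | key :: rest, y =>
      let y' := if PySem.Str.isIn (String.ofList [key]) b = false
                then y.update [(key, (0 : Int))] else y
      if x.getD key 0 > y'.getD key 0 then 0
      else pvLoopA b x rest y'

def czyUkladalne (a : String) (b : String) : Bool :=
  let x := pvSlownik a
  let y := pvSlownik b
  let ukladalne := pvLoopA b x x.keys y
  if ukladalne = 1 then true else false

-- ===== PORT B =====
-- inner while loop: advance through sb until the current letter is matched; some rest = suffix after the match
def pvMatchFrom (c : Char) : List Char → Option (List Char)
  | [] => none
  | d :: ds => if d = c then some ds else pvMatchFrom c ds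

-- outer for loop over the sorted letters of a
def pvTwoPtr : List Char → List Char → Bool
  | [], _ => true
  | c :: cs, sb =>
      match pvMatchFrom c sb with
      | none => false
      | some rest => pvTwoPtr cs rest

def czyUkladalne_alt (a : String) (b : String) : Bool :=
  pvTwoPtr (PySem.List.sorted a.toList (fun x => x) false)
           (PySem.List.sorted b.toList (fun x => x) false)

-- ===== PRECONDITION & SPEC =====
def Spec_czyUkladalne (a : String) (b : String) (out : Bool) : Prop := out = czyUkladalne_alt a b
instance (a : String) (b : String) (out : Bool) : Decidable (Spec_czyUkladalne a b out) := by unfold Spec_czyUkladalne; infer_instance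

-- ===== CLAIM (what is proved, stated in full; the proofs are below) =====
def Claim_equal_czyUkladalne : Prop := ∀ (a : String) (b : String), Dom_czyUkladalne a b → Spec_czyUkladalne a b (czyUkladalne a b)

-- ===== LEMMAS AND PROOFS =====

-- B-side: the two-pointer scan is the greedy subsequence test
theorem pvTwoPtr_eq_isSublist : ∀ (sb sa : List Char), pvTwoPtr sa sb = sa.isSublist sb
  | _, [] => by cases ‹List Char› <;> rfl
  | [], c :: cs => rfl
  | d :: ds, c :: cs => by
      by_cases h : d = c
      · subst h
        simp [pvTwoPtr, pvMatchFrom, List.isSublist, pvTwoPtr_eq_isSublist ds cs]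
      · have hne : (c == d) = false := by simp [Ne.symm h]
        simp [pvTwoPtr, pvMatchFrom, h, List.isSublist, hne,
              ← pvTwoPtr_eq_isSublist ds (c :: cs), pvTwoPtr, pvMatchFrom]

theorem alt_true_iff (a b : String) :
    czyUkladalne_alt a b = true ↔ ∀ c ∈ a.toList, a.toList.count c ≤ b.toList.count c := by
  unfold czyUkladalne_alt
  rw [pvTwoPtr_eq_isSublist, List.isSublist_iff_sublist]
  constructor
  · intro h
    rw [← List.subperm_ext_iff]
    exact ((PySem.List.sorted_perm a.toList (fun x => x) false).symm.subperm).trans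
      (h.subperm.trans (PySem.List.sorted_perm b.toList (fun x => x) false).subperm)
  · intro h
    refine @List.sublist_of_subperm_of_pairwise _ (fun x y => x ≤ y)
      ⟨fun _ _ h1 h2 => le_antisymm h1 h2⟩ _ _ ?_ ?_ ?_
    · exact ((PySem.List.sorted_perm a.toList (fun x => x) false).subperm).trans
        ((List.subperm_ext_iff.mpr h).trans
          (PySem.List.sorted_perm b.toList (fun x => x) false).symm.subperm)
    · exact PySem.List.sorted_pairwise a.toList (fun x => x)
    · exact PySem.List.sorted_pairwise b.toList (fun x => x)

-- A-side: lookups in a dict built from (x, f x) pairs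
theorem get?_update_map (f : Char → Int) :
    ∀ (xs : List Char) (d : PySem.Dict Char Int) (c : Char),
      (d.update (xs.map (fun x => (x, f x)))).get? c
        = if c ∈ xs then some (f c) else d.get? c
  | [], d, c => by simp [PySem.Dict.update]
  | x :: rest, d, c => by
      have : (d.update ((x :: rest).map (fun x => (x, f x))))
          = ((d.insert x (f x)).update (rest.map (fun x => (x, f x)))) := by
        simp [PySem.Dict.update]
      rw [this, get?_update_map f rest]
      by_cases hc : c ∈ rest
      · simp [hc]
      · by_cases hx : c = x
        · subst hx; simp [hc, PySem.Dict.get?_insert_self]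
        · simp [hc, hx, PySem.Dict.get?_insert d x c (f x)]

theorem slownik_get? (s : String) (c : Char) :
    (pvSlownik s).get? c
      = if c ∈ s.toList then some ((s.toList.count c : Int)) else none := by
  unfold pvSlownik
  dsimp only
  rw [PySem.List.foldl_append_singleton_eq_map]
  have hcnt : ∀ l : Char,
      s.toList.foldl (fun i k => if k == l then i + 1 else i) (0 : Int)
        = ((s.toList.count l : Nat) : Int) := by
    intro l
    rw [PySem.List.foldl_count_if (fun k => k == l) s.toList 0]
    simp [List.count]
  have hmap : s.toList.map (fun l =>
      s.toList.foldl (fun i k => if k == l then i + 1 else i) (0 : Int))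
        = s.toList.map (fun l => ((s.toList.count l : Nat) : Int)) :=
    List.map_congr_left (fun l _ => hcnt l)
  rw [List.nil_append, hmap]
  have hzip : s.toList.zip (s.toList.map (fun l => ((s.toList.count l : Nat) : Int)))
      = s.toList.map (fun x => (x, ((s.toList.count x : Nat) : Int))) := by
    have h := @List.zip_map' Char Char Int id
      (fun l => ((s.toList.count l : Nat) : Int)) s.toList
    simpa using h
  rw [hzip]
  exact get?_update_map (fun x => ((s.toList.count x : Nat) : Int)) s.toList PySem.Dict.empty c

theorem slownik_getD (s : String) (c : Char) :
    (pvSlownik s).getD c 0 = ((s.toList.count c : Nat) : Int) := by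
  rw [PySem.Dict.getD_eq_get?_getD, slownik_get?]
  by_cases h : c ∈ s.toList
  · simp [h]
  · simp [h, List.count_eq_zero_of_not_mem h]

theorem mem_keys_slownik (s : String) (c : Char) :
    c ∈ (pvSlownik s).keys ↔ c ∈ s.toList := by
  constructor
  · intro h
    by_contra hc
    exact ((PySem.Dict.get?_eq_none_iff_not_mem_keys _ c).mp
      (by rw [slownik_get?]; simp [hc])) h
  · intro h
    by_contra hk
    have := (PySem.Dict.get?_eq_none_iff_not_mem_keys (pvSlownik s) c).mpr hk
    rw [slownik_get?] at this
    simp [h] at this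

theorem isIn_singleton (k : Char) (b : String) :
    PySem.Str.isIn (String.ofList [k]) b = true ↔ k ∈ b.toList := by
  rw [PySem.Str.isIn_iff_infix]
  simpa using List.singleton_infix_iff k b.toList

-- the loop with break: returns 1 iff every key passes its test (nodup keys: the y-patch never affects later keys)
theorem loopA_eq_one_iff (b : String) (x y0 : PySem.Dict Char Int) :
    ∀ (keys : List Char), keys.Nodup → ∀ (y : PySem.Dict Char Int),
      (∀ k ∈ keys, y.getD k 0 = y0.getD k 0) →
      (pvLoopA b x keys y = 1 ↔
        ∀ k ∈ keys, x.getD k 0 ≤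
          (if PySem.Str.isIn (String.ofList [k]) b = true then y0.getD k 0 else 0))
  | [], _, y, _ => by simp [pvLoopA]
  | key :: rest, hnd, y, hy => by
      have hndr := (List.nodup_cons.mp hnd).2
      have hknr := (List.nodup_cons.mp hnd).1
      by_cases hin : PySem.Str.isIn (String.ofList [key]) b = true
      · have hinC : PySem.Chars.isIn [key] b.toList = true := by simpa using hin
        have hred : pvLoopA b x (key :: rest) y
            = if x.getD key 0 > y.getD key 0 then 0 else pvLoopA b x rest y := by
          simp [pvLoopA, hinC]
        have hy' : ∀ k ∈ rest, y.getD k 0 = y0.getD k 0 :=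
          fun k hk => hy k (List.mem_cons_of_mem _ hk)
        by_cases hgt : x.getD key 0 > y.getD key 0
        · rw [hred, if_pos hgt]
          constructor
          · intro h; exact absurd h (by norm_num)
          · intro h
            have := h key List.mem_cons_self
            rw [if_pos hin, ← hy key List.mem_cons_self] at this
            omega
        · rw [hred, if_neg hgt, loopA_eq_one_iff b x y0 rest hndr y hy']
          constructor
          · intro h k hk
            rcases List.mem_cons.mp hk with rfl | hk'
            · rw [if_pos hin, ← hy k List.mem_cons_self]; omega
            · exact h k hk'
          · intro h k hk; exact h k (List.mem_cons_of_mem _ hk)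
      · -- key not in b: y is patched with y[key] = 0
        have hinF : PySem.Chars.isIn [key] b.toList = false := by simpa using hin
        have hupd : (y.update [(key, (0 : Int))]) = y.insert key 0 := by
          simp [PySem.Dict.update]
        have hself : (y.insert key 0).getD key 0 = 0 := by
          rw [PySem.Dict.getD_insert]; simp
        have hred : pvLoopA b x (key :: rest) y
            = if x.getD key 0 > 0 then 0 else pvLoopA b x rest (y.insert key 0) := by
          simp [pvLoopA, hinF, hupd, hself]
        have hy' : ∀ k ∈ rest, (y.insert key 0).getD k 0 = y0.getD k 0 := by
          intro k hk
          rw [PySem.Dict.getD_insert]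
          have hne : k ≠ key := fun h => hknr (h ▸ hk)
          rw [if_neg hne]
          exact hy k (List.mem_cons_of_mem _ hk)
        by_cases hgt : x.getD key 0 > 0
        · rw [hred, if_pos hgt]
          constructor
          · intro h; exact absurd h (by norm_num)
          · intro h
            have := h key List.mem_cons_self
            rw [if_neg hin] at this
            omega
        · rw [hred, if_neg hgt, loopA_eq_one_iff b x y0 rest hndr _ hy']
          constructor
          · intro h k hk
            rcases List.mem_cons.mp hk with rfl | hk'
            · rw [if_neg hin]; omega
            · exact h k hk'
          · intro h k hk; exact h k (List.mem_cons_of_mem _ hk)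

theorem a_true_iff (a b : String) :
    czyUkladalne a b = true ↔ ∀ c ∈ a.toList, a.toList.count c ≤ b.toList.count c := by
  unfold czyUkladalne
  have hnd : (pvSlownik a).keys.Nodup := PySem.Dict.nodup_keys_ofList _
  rw [show (if pvLoopA b (pvSlownik a) (pvSlownik a).keys (pvSlownik b) = 1 then true else false) = true
        ↔ pvLoopA b (pvSlownik a) (pvSlownik a).keys (pvSlownik b) = 1 by split_ifs with h <;> simp [h]]
  rw [loopA_eq_one_iff b (pvSlownik a) (pvSlownik b) (pvSlownik a).keys hnd (pvSlownik b)
        (fun _ _ => rfl)]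
  constructor
  · intro h c hc
    have := h c ((mem_keys_slownik a c).mpr hc)
    rw [slownik_getD] at this
    by_cases hb : c ∈ b.toList
    · rw [if_pos ((isIn_singleton c b).mpr hb), slownik_getD] at this
      exact_mod_cast this
    · rw [if_neg (fun hh => hb ((isIn_singleton c b).mp hh))] at this
      have : a.toList.count c = 0 := by omega
      omega
  · intro h k hk
    have hc := (mem_keys_slownik a k).mp hk
    have := h k hc
    rw [slownik_getD]
    by_cases hb : k ∈ b.toList
    · rw [if_pos ((isIn_singleton k b).mpr hb), slownik_getD]
      exact_mod_cast this
    · rw [if_neg (fun hh => hb ((isIn_singleton k b).mp hh))]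
      rw [List.count_eq_zero_of_not_mem hb] at this
      omega

-- ===== VERDICT (by name: the statement is the Claim_ definition above) =====
theorem czyUkladalne_spec : Claim_equal_czyUkladalne := by
  intro a b _
  unfold Spec_czyUkladalne
  have := (a_true_iff a b).trans (alt_true_iff a b).symm
  cases h1 : czyUkladalne a b <;> cases h2 : czyUkladalne_alt a b <;>
    simp_all
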